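-- pv_equiv track=rewrite | github.com/Muhdiab686/IR | services/preprocessing/preprocessor.py | preprocess_bm25
-- ===== SOURCE A (Python) =====
-- import string
--
-- def preprocess_bm25(text: str) -> list[str]:
--     """
--     معالجة خفيفة لاستعلامات وبيانات BM25: تصغير الأحرف + حذف الترقيم + تقطيع بسيط.
--     (لا إزالة توقف، لا Stemming)
--     """
--     if not isinstance(text, str):
--         return []
--     # تصغير الأحرف
--     text = text.lower()
--     # حذف علامات الترقيم
--     text = text.translate(str.maketrans('', '', string.punctuation))
--     # تقطيع على الفراغات
--     tokens = text.split()
--     # حذف التوكنات الفارغة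
--     tokens = [t for t in tokens if t.strip()]
--     return tokens
-- ===== SOURCE B (Python) =====
-- import string
--
-- def preprocess_bm25(text: str) -> list[str]:
--     if not isinstance(text, str):
--         return []
--     punct = set(string.punctuation)
--     tokens = []
--     buf = []
--     for ch in text:
--         if ch in punct:
--             continue
--         elif ch.isspace():
--             if buf:
--                 tokens.append(''.join(buf))
--                 buf = []
--         else:
--             buf.append(ch.lower())
--     if buf:
--         tokens.append(''.join(buf))
--     return tokens
-- ===== Notes on version B (the rewrite author's own statement) =====
-- stated objective: alternative
-- what changed: Replaced the four-pass lower/translate/split/filter pipeline with a single character scan that skips punctuation, flushes a token buffer on whitespace, and lowercases while accumulating.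
import Mathlib
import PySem

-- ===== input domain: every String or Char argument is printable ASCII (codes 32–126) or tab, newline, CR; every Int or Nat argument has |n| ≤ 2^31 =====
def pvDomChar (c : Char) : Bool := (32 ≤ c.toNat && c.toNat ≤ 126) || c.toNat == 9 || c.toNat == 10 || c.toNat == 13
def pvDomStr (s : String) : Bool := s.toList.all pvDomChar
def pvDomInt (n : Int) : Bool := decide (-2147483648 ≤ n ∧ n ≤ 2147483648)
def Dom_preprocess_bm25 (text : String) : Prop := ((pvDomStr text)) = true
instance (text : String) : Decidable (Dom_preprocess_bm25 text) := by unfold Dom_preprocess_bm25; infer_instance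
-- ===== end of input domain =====

-- B replaces A's four-pass lower/translate/split/filter pipeline by one character scan with a
-- token buffer (objective: alternative — a single pass maintaining token state, no intermediate strings).

-- string.punctuation (the 32 ASCII punctuation characters)
def pyPunctuation : List Char :=
  ['!', '"', '#', '$', '%', '&', '\'', '(', ')', '*', '+', ',', '-', '.', '/',
   ':', ';', '<', '=', '>', '?', '@', '[', '\\', ']', '^', '_', '`', '{', '|', '}', '~']

-- ===== PORT A =====
-- the isinstance guard cannot fire (text : String is always a str); translate with a
-- maketrans('','',punct) deletion table deletes exactly the punctuation characters, ported
-- by hand as a filter (exact); ''-truthiness of t.strip() is (strip t).isEmpty = false.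
def preprocess_bm25 (text : String) : List String :=
  let t1 : List Char := PySem.Chars.lower text.toList
  let t2 : List Char := t1.filter (fun c => !(pyPunctuation.contains c))
  let toks : List (List Char) := PySem.Chars.split₀ t2
  (toks.filter (fun t => !(PySem.Chars.strip t).isEmpty)).map String.ofList

-- ===== PORT B =====
-- the for-loop of Source B: state = (tokens so far, current buffer); ''.join(buf) = String.ofList buf
def preprocess_bm25_alt_loop : List Char → List String → List Char → List String
  | [], tokens, buf => if buf.isEmpty then tokens else tokens ++ [String.ofList buf]
  | c :: rest, tokens, buf =>
    if pyPunctuation.contains c then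
      preprocess_bm25_alt_loop rest tokens buf
    else if PySem.Chars.isspace c then
      if buf.isEmpty then preprocess_bm25_alt_loop rest tokens []
      else preprocess_bm25_alt_loop rest (tokens ++ [String.ofList buf]) []
    else
      preprocess_bm25_alt_loop rest tokens (buf ++ [PySem.Chars.lowerChar c])

def preprocess_bm25_alt (text : String) : List String :=
  preprocess_bm25_alt_loop text.toList [] []

-- ===== PRECONDITION & SPEC =====
def Spec_preprocess_bm25 (text : String) (out : List String) : Prop := out = preprocess_bm25_alt text
instance (text : String) (out : List String) : Decidable (Spec_preprocess_bm25 text out) := by unfold Spec_preprocess_bm25; infer_instance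

-- ===== CLAIM (what is proved, stated in full; the proofs are below) =====
def Claim_equal_preprocess_bm25 : Prop := ∀ (text : String), Dom_preprocess_bm25 text → Spec_preprocess_bm25 text (preprocess_bm25 text)

-- ===== LEMMAS AND PROOFS =====

lemma mem_punct_toNat : ∀ c ∈ pyPunctuation,
    (33 ≤ c.toNat ∧ c.toNat ≤ 47) ∨ (58 ≤ c.toNat ∧ c.toNat ≤ 64) ∨
    (91 ≤ c.toNat ∧ c.toNat ≤ 96) ∨ (123 ≤ c.toNat ∧ c.toNat ≤ 126) := by
  intro c hc; fin_cases hc <;> simp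

lemma isupper_iff (c : Char) : PySem.Chars.isupper c = true ↔ 65 ≤ c.toNat ∧ c.toNat ≤ 90 := by
  rw [PySem.Chars.isupper]
  simp only [Bool.and_eq_true, decide_eq_true_eq, Char.le_def, UInt32.le_iff_toNat_le]
  change 65 ≤ c.val.toNat ∧ c.val.toNat ≤ 90 ↔ _
  rfl

lemma toNat_lowerChar_upper (c : Char) (h : PySem.Chars.isupper c = true) :
    (PySem.Chars.lowerChar c).toNat = c.toNat + 32 := by
  rw [PySem.Chars.lowerChar, if_pos h, Char.toNat_ofNat]
  have := (isupper_iff c).mp h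
  simp [Nat.isValidChar]; omega

lemma isspace_iff (c : Char) : PySem.Chars.isspace c = true ↔
    (c.toNat = 32 ∨ (9 ≤ c.toNat ∧ c.toNat ≤ 13) ∨ (28 ≤ c.toNat ∧ c.toNat ≤ 31) ∨
     c.toNat = 133 ∨ c.toNat = 160 ∨ c.toNat = 5760 ∨ (8192 ≤ c.toNat ∧ c.toNat ≤ 8202) ∨
     c.toNat = 8232 ∨ c.toNat = 8233 ∨ c.toNat = 8239 ∨ c.toNat = 8287 ∨ c.toNat = 12288) := by
  rw [PySem.Chars.isspace]
  simp only [Bool.or_eq_true, Bool.and_eq_true, decide_eq_true_eq]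
  tauto

lemma contains_eq_false_of_letter (c : Char) (h1 : 65 ≤ c.toNat) (h2 : c.toNat ≤ 122)
    (h3 : ¬(91 ≤ c.toNat ∧ c.toNat ≤ 96)) : pyPunctuation.contains c = false := by
  rw [Bool.eq_false_iff]
  intro hc
  have := mem_punct_toNat c (List.contains_iff_mem.mp hc)
  omega

-- lowercasing never moves a character into or out of the punctuation set
lemma punct_lower (c : Char) :
    pyPunctuation.contains (PySem.Chars.lowerChar c) = pyPunctuation.contains c := by
  by_cases h : PySem.Chars.isupper c = true
  · have hb := (isupper_iff c).mp h
    have ht := toNat_lowerChar_upper c h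
    rw [contains_eq_false_of_letter _ (by omega) (by omega) (by omega),
        contains_eq_false_of_letter _ (by omega) (by omega) (by omega)]
  · rw [PySem.Chars.lowerChar, if_neg h]

-- lowercasing never moves a character into or out of the whitespace set
lemma isspace_lower (c : Char) :
    PySem.Chars.isspace (PySem.Chars.lowerChar c) = PySem.Chars.isspace c := by
  by_cases h : PySem.Chars.isupper c = true
  · have hb := (isupper_iff c).mp h
    have ht := toNat_lowerChar_upper c h
    have h1 : PySem.Chars.isspace (PySem.Chars.lowerChar c) = false := by
      rw [Bool.eq_false_iff]; intro hs; have := (isspace_iff _).mp hs; omega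
    have h2 : PySem.Chars.isspace c = false := by
      rw [Bool.eq_false_iff]; intro hs; have := (isspace_iff _).mp hs; omega
    rw [h1, h2]
  · rw [PySem.Chars.lowerChar, if_neg h]

-- split₀.go's accumulator factors out
lemma go_acc (s : List Char) (cur : List Char) (acc : List (List Char)) :
    PySem.Chars.split₀.go s cur acc = acc.reverse ++ PySem.Chars.split₀.go s cur [] := by
  induction s generalizing cur acc with
  | nil => simp [PySem.Chars.split₀.go]; split <;> simp
  | cons c rest ih =>
    simp only [PySem.Chars.split₀.go]
    split
    · split
      · exact ih _ _
      · rw [ih _ (cur.reverse :: acc), ih _ [cur.reverse]]; simp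
    · exact ih _ _

-- the scanner, run on the raw text, equals split₀.go run on the lowered, punctuation-free text
lemma loop_eq_go (cs : List Char) (toks : List String) (buf : List Char) :
    preprocess_bm25_alt_loop cs toks buf =
      toks ++ (PySem.Chars.split₀.go
        ((PySem.Chars.lower cs).filter (fun c => !(pyPunctuation.contains c)))
        buf.reverse []).map String.ofList := by
  induction cs generalizing toks buf with
  | nil =>
    simp [preprocess_bm25_alt_loop, PySem.Chars.split₀.go, PySem.Chars.lower]
    cases buf <;> simp
  | cons c rest ih =>
    simp only [preprocess_bm25_alt_loop, PySem.Chars.lower, List.map_cons, List.filter_cons]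
    by_cases hp : pyPunctuation.contains c = true
    · rw [if_pos hp]
      have : (!pyPunctuation.contains (PySem.Chars.lowerChar c)) = false := by
        rw [punct_lower, hp]; rfl
      rw [this, if_neg (by simp)]
      exact ih toks buf
    · rw [if_neg hp]
      have hnp : (!pyPunctuation.contains (PySem.Chars.lowerChar c)) = true := by
        rw [punct_lower]; simp_all
      rw [if_pos hnp]
      by_cases hs : PySem.Chars.isspace c = true
      · rw [if_pos hs]
        have : PySem.Chars.split₀.go (PySem.Chars.lowerChar c :: (List.map PySem.Chars.lowerChar rest).filter (fun c => !(pyPunctuation.contains c))) buf.reverse [] =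
            if buf.reverse = [] then PySem.Chars.split₀.go ((List.map PySem.Chars.lowerChar rest).filter (fun c => !(pyPunctuation.contains c))) [] []
            else PySem.Chars.split₀.go ((List.map PySem.Chars.lowerChar rest).filter (fun c => !(pyPunctuation.contains c))) [] [buf.reverse.reverse] := by
          simp only [PySem.Chars.split₀.go, isspace_lower, hs, if_true]
          split <;> simp_all
        rw [this]
        cases hb : buf with
        | nil =>
          subst hb
          simp only [List.isEmpty_nil, List.reverse_nil, if_true]
          simpa [PySem.Chars.lower] using ih toks []
        | cons b bs =>
          subst hb
          rw [if_neg (by simp), go_acc _ _ [_]]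
          simp only [List.reverse_cons, List.reverse_nil, List.nil_append]
          have := ih (toks ++ [String.ofList (b :: bs)]) []
          simp only [PySem.Chars.lower, List.reverse_nil] at this
          rw [this]; simp
      · rw [if_neg hs]
        have : PySem.Chars.split₀.go (PySem.Chars.lowerChar c :: (List.map PySem.Chars.lowerChar rest).filter (fun c => !(pyPunctuation.contains c))) buf.reverse [] =
            PySem.Chars.split₀.go ((List.map PySem.Chars.lowerChar rest).filter (fun c => !(pyPunctuation.contains c))) (PySem.Chars.lowerChar c :: buf.reverse) [] := by
          simp only [PySem.Chars.split₀.go, isspace_lower]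
          rw [if_neg hs]
        rw [this]
        have := ih toks (buf ++ [PySem.Chars.lowerChar c])
        simp only [PySem.Chars.lower, List.reverse_append, List.reverse_cons, List.reverse_nil,
          List.nil_append, List.singleton_append] at this
        exact this

-- every token split₀.go produces is nonempty and whitespace-free
lemma go_props (s : List Char) (cur : List Char) (acc : List (List Char))
    (hcur : ∀ c ∈ cur, PySem.Chars.isspace c = false)
    (hacc : ∀ t ∈ acc, t ≠ [] ∧ ∀ c ∈ t, PySem.Chars.isspace c = false) :
    ∀ t ∈ PySem.Chars.split₀.go s cur acc, t ≠ [] ∧ ∀ c ∈ t, PySem.Chars.isspace c = false := by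
  induction s generalizing cur acc with
  | nil =>
    simp only [PySem.Chars.split₀.go]
    split
    · simpa using hacc
    · intro t ht
      rw [List.mem_reverse, List.mem_cons] at ht
      rcases ht with h | h
      · subst h
        refine ⟨by simp_all, fun c hc => hcur c (List.mem_reverse.mp hc)⟩
      · exact hacc t h
  | cons c rest ih =>
    simp only [PySem.Chars.split₀.go]
    split
    · split
      · exact ih [] acc (by simp) hacc
      · refine ih [] (cur.reverse :: acc) (by simp) ?_
        intro t ht
        rcases List.mem_cons.mp ht with h | h
        · subst h; exact ⟨by simp_all, fun d hd => hcur d (List.mem_reverse.mp hd)⟩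
        · exact hacc t h
    · refine ih (c :: cur) acc ?_ hacc
      intro d hd
      rcases List.mem_cons.mp hd with h | h
      · subst h; simp_all
      · exact hcur d h

lemma strip_of_nospace (t : List Char) (h : ∀ c ∈ t, PySem.Chars.isspace c = false) :
    PySem.Chars.strip t = t := by
  rw [PySem.Chars.strip, PySem.Chars.lstrip, PySem.Chars.rstrip]
  rw [List.dropWhile_eq_self_iff.mpr, List.dropWhile_eq_self_iff.mpr, List.reverse_reverse]
  · intro hne
    simp only [h _ (List.getElem_mem hne), Bool.false_eq_true, not_false_eq_true]
  · intro hne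
    have hm : (List.dropWhile PySem.Chars.isspace t).reverse[0] ∈ t :=
      (List.dropWhile_sublist _).subset (List.mem_reverse.mp (List.getElem_mem hne))
    simp only [h _ hm, Bool.false_eq_true, not_false_eq_true]

-- ===== VERDICT (by name: the statement is the Claim_ definition above) =====
theorem preprocess_bm25_spec : Claim_equal_preprocess_bm25 := by
  intro text _
  unfold Spec_preprocess_bm25 preprocess_bm25 preprocess_bm25_alt
  simp only []
  set t2 := (PySem.Chars.lower text.toList).filter (fun c => !(pyPunctuation.contains c)) with ht2
  have hprops := go_props t2 [] [] (by simp) (by simp)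
  have hfilter : (PySem.Chars.split₀ t2).filter (fun t => !(PySem.Chars.strip t).isEmpty)
      = PySem.Chars.split₀ t2 := by
    apply List.filter_eq_self.mpr
    intro t ht
    have h := hprops t (by simpa [PySem.Chars.split₀] using ht)
    rw [strip_of_nospace t h.2]
    simpa using h.1
  rw [hfilter, loop_eq_go text.toList [] []]
  simp [PySem.Chars.split₀, ht2]
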